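-- pv_equiv track=rewrite | github.com/EverardoG/ArmyAntSim | process_data/process_s_curve.py | get_early_termination_sims
-- ===== SOURCE A (Python) =====
-- def get_early_termination_sims(ks, offsets, metrics_dict):
--     stacking_list = []
--     towering_list = []
--     stuck_list = []
--     toolong_list = []
--     for k in ks:
--         for offset in offsets:
--             if (k, offset) in metrics_dict:
--                 results = metrics_dict[(k, offset)]
--                 if results["m_stacking"] == "1":
--                     stacking_list.append((k,offset))
--                 if results["m_towering"] == "1":
--                     towering_list.append((k, offset))
--                 if results["m_simulationStuck"] == "1":
--                     stuck_list.append((k, offset))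
--                 if results["m_tooLongDissolution"] == "1":
--                     toolong_list.append((k, offset))
--     return stacking_list, towering_list, stuck_list, toolong_list
-- ===== SOURCE B (Python) =====
-- def _collect(ks, offsets, metrics_dict, metric):
--     return [(k, offset)
--             for k in ks
--             for offset in offsets
--             for results in (metrics_dict.get((k, offset)),)
--             if results is not None and results[metric] == "1"]
--
-- def get_early_termination_sims(ks, offsets, metrics_dict):
--     return (_collect(ks, offsets, metrics_dict, "m_stacking"),
--             _collect(ks, offsets, metrics_dict, "m_towering"),
--             _collect(ks, offsets, metrics_dict, "m_simulationStuck"),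
--             _collect(ks, offsets, metrics_dict, "m_tooLongDissolution"))
-- ===== Notes on version B (the rewrite author's own statement) =====
-- stated objective: simpler
-- what changed: Replaces the single fused nested loop maintaining four accumulator lists with one generic comprehension helper run as four independent passes over the (ks, offsets) grid, one per termination metric.
import Mathlib
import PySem

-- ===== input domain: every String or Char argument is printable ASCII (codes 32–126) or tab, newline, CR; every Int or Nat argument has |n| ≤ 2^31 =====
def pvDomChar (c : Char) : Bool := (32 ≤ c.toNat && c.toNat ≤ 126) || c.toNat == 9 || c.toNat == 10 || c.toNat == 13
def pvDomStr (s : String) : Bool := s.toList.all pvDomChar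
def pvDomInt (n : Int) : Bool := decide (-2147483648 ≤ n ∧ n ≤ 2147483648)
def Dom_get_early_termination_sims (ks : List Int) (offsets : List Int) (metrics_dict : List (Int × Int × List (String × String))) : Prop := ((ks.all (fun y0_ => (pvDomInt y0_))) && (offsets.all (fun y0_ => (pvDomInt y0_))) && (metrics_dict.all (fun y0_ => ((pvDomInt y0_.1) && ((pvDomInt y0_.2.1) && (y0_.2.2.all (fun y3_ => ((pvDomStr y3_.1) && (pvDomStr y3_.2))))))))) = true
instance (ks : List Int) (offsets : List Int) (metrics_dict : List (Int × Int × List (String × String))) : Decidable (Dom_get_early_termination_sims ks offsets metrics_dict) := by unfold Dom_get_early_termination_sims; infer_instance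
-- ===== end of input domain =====

-- B replaces A's single fused nested loop carrying four accumulators by one generic
-- collection pass run independently for each of the four metrics (objective: simpler).

-- shared lookup helpers (assoc-list first-match lookup, = Python dict lookup)
def pvLookup (md : List (Int × Int × List (String × String))) (k off : Int) :
    Option (List (String × String)) :=
  match md with
  | [] => none
  | e :: rest => if e.1 == k && e.2.1 == off then some e.2.2 else pvLookup rest k off

def pvGetS (r : List (String × String)) (key : String) : Option String :=
  match r with
  | [] => none
  | e :: rest => if e.1 == key then some e.2 else pvGetS rest key

-- ===== PORT A =====
-- the fused loop body of A (one grid cell), applied to the 4-tuple accumulator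
def pvStepA (md : List (Int × Int × List (String × String))) (k off : Int)
    (acc : (List (Int × Int)) × (List (Int × Int)) × (List (Int × Int)) × (List (Int × Int))) :
    (List (Int × Int)) × (List (Int × Int)) × (List (Int × Int)) × (List (Int × Int)) :=
  match pvLookup md k off with
  | none => acc
  | some results =>
    let a1 := if pvGetS results "m_stacking" == some "1" then
      (acc.1 ++ [(k, off)], acc.2.1, acc.2.2.1, acc.2.2.2) else acc
    let a2 := if pvGetS results "m_towering" == some "1" then
      (a1.1, a1.2.1 ++ [(k, off)], a1.2.2.1, a1.2.2.2) else a1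
    let a3 := if pvGetS results "m_simulationStuck" == some "1" then
      (a2.1, a2.2.1, a2.2.2.1 ++ [(k, off)], a2.2.2.2) else a2
    if pvGetS results "m_tooLongDissolution" == some "1" then
      (a3.1, a3.2.1, a3.2.2.1, a3.2.2.2 ++ [(k, off)]) else a3

def get_early_termination_sims (ks : List Int) (offsets : List Int) (metrics_dict : List (Int × Int × List (String × String))) : (List (Int × Int)) × (List (Int × Int)) × (List (Int × Int)) × (List (Int × Int)) :=
  ks.foldl (fun acc k => offsets.foldl (fun acc2 off => pvStepA metrics_dict k off acc2) acc)
    ([], [], [], [])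

-- ===== PORT B =====
-- one comprehension pass collecting the cells whose given metric equals "1"
def pvCollect (ks offsets : List Int) (md : List (Int × Int × List (String × String)))
    (metric : String) : List (Int × Int) :=
  ks.flatMap (fun k => offsets.filterMap (fun off =>
    match pvLookup md k off with
    | some r => if pvGetS r metric == some "1" then some (k, off) else none
    | none => none))

def get_early_termination_sims_alt (ks : List Int) (offsets : List Int) (metrics_dict : List (Int × Int × List (String × String))) : (List (Int × Int)) × (List (Int × Int)) × (List (Int × Int)) × (List (Int × Int)) :=
  (pvCollect ks offsets metrics_dict "m_stacking",
   pvCollect ks offsets metrics_dict "m_towering",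
   pvCollect ks offsets metrics_dict "m_simulationStuck",
   pvCollect ks offsets metrics_dict "m_tooLongDissolution")

-- ===== PRECONDITION & SPEC =====
-- Pre_ excludes exactly the inputs on which Python A raises KeyError: some entry of
-- metrics_dict is reachable from the (ks, offsets) grid but its results dict lacks one
-- of the four metric keys.
def Pre_get_early_termination_sims (ks : List Int) (offsets : List Int) (metrics_dict : List (Int × Int × List (String × String))) : Prop :=
  ∀ e ∈ metrics_dict, e.1 ∈ ks → e.2.1 ∈ offsets →
    ("m_stacking" ∈ e.2.2.map Prod.fst ∧ "m_towering" ∈ e.2.2.map Prod.fst ∧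
     "m_simulationStuck" ∈ e.2.2.map Prod.fst ∧ "m_tooLongDissolution" ∈ e.2.2.map Prod.fst)
instance (ks : List Int) (offsets : List Int) (metrics_dict : List (Int × Int × List (String × String))) : Decidable (Pre_get_early_termination_sims ks offsets metrics_dict) := by unfold Pre_get_early_termination_sims; infer_instance

def pvWitness_get_early_termination_sims : List Int × List Int × (List (Int × Int × List (String × String))) :=
  ([1, 3], [2],
   [(1, 2, [("m_stacking", "1"), ("m_towering", "0"), ("m_simulationStuck", "0"), ("m_tooLongDissolution", "1")])])

def Spec_get_early_termination_sims (ks : List Int) (offsets : List Int) (metrics_dict : List (Int × Int × List (String × String))) (out : (List (Int × Int)) × (List (Int × Int)) × (List (Int × Int)) × (List (Int × Int))) : Prop := out = get_early_termination_sims_alt ks offsets metrics_dict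
instance (ks : List Int) (offsets : List Int) (metrics_dict : List (Int × Int × List (String × String))) (out : (List (Int × Int)) × (List (Int × Int)) × (List (Int × Int)) × (List (Int × Int))) : Decidable (Spec_get_early_termination_sims ks offsets metrics_dict out) := by unfold Spec_get_early_termination_sims; infer_instance

-- ===== CLAIM (what is proved, stated in full; the proofs are below) =====
def Claim_equal_get_early_termination_sims : Prop := ∀ (ks : List Int) (offsets : List Int) (metrics_dict : List (Int × Int × List (String × String))), Dom_get_early_termination_sims ks offsets metrics_dict → Pre_get_early_termination_sims ks offsets metrics_dict → Spec_get_early_termination_sims ks offsets metrics_dict (get_early_termination_sims ks offsets metrics_dict)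

-- ===== LEMMAS AND PROOFS =====

-- the contribution of one grid cell to the list of one metric
def pvCell (md : List (Int × Int × List (String × String))) (metric : String) (k off : Int) :
    List (Int × Int) :=
  match pvLookup md k off with
  | some r => if pvGetS r metric == some "1" then [(k, off)] else []
  | none => []

lemma pvStepA_eq (md : List (Int × Int × List (String × String))) (k off : Int)
    (acc : (List (Int × Int)) × (List (Int × Int)) × (List (Int × Int)) × (List (Int × Int))) :
    pvStepA md k off acc =
      (acc.1 ++ pvCell md "m_stacking" k off,
       acc.2.1 ++ pvCell md "m_towering" k off,
       acc.2.2.1 ++ pvCell md "m_simulationStuck" k off,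
       acc.2.2.2 ++ pvCell md "m_tooLongDissolution" k off) := by
  obtain ⟨a, b, c, d⟩ := acc
  cases hl : pvLookup md k off with
  | none => simp [pvStepA, pvCell, hl]
  | some r =>
    simp only [pvStepA, pvCell, hl]
    split_ifs <;> simp

lemma row_eq (md : List (Int × Int × List (String × String))) (k : Int) (offsets : List Int)
    (acc : (List (Int × Int)) × (List (Int × Int)) × (List (Int × Int)) × (List (Int × Int))) :
    offsets.foldl (fun acc2 off => pvStepA md k off acc2) acc =
      (acc.1 ++ offsets.flatMap (pvCell md "m_stacking" k),
       acc.2.1 ++ offsets.flatMap (pvCell md "m_towering" k),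
       acc.2.2.1 ++ offsets.flatMap (pvCell md "m_simulationStuck" k),
       acc.2.2.2 ++ offsets.flatMap (pvCell md "m_tooLongDissolution" k)) := by
  induction offsets generalizing acc with
  | nil => simp
  | cons o os ih =>
    rw [List.foldl_cons, ih, pvStepA_eq]
    simp [List.flatMap_cons, List.append_assoc]

lemma grid_eq (md : List (Int × Int × List (String × String))) (ks offsets : List Int)
    (acc : (List (Int × Int)) × (List (Int × Int)) × (List (Int × Int)) × (List (Int × Int))) :
    ks.foldl (fun acc k => offsets.foldl (fun acc2 off => pvStepA md k off acc2) acc) acc =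
      (acc.1 ++ ks.flatMap (fun k => offsets.flatMap (pvCell md "m_stacking" k)),
       acc.2.1 ++ ks.flatMap (fun k => offsets.flatMap (pvCell md "m_towering" k)),
       acc.2.2.1 ++ ks.flatMap (fun k => offsets.flatMap (pvCell md "m_simulationStuck" k)),
       acc.2.2.2 ++ ks.flatMap (fun k => offsets.flatMap (pvCell md "m_tooLongDissolution" k))) := by
  induction ks generalizing acc with
  | nil => simp
  | cons x xs ih =>
    rw [List.foldl_cons, ih, row_eq]
    simp [List.flatMap_cons, List.append_assoc]

lemma pvCollect_eq_flatMap (ks offsets : List Int) (md : List (Int × Int × List (String × String)))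
    (metric : String) :
    pvCollect ks offsets md metric =
      ks.flatMap (fun k => offsets.flatMap (pvCell md metric k)) := by
  unfold pvCollect
  congr 1; funext k
  induction offsets with
  | nil => rfl
  | cons o os ih =>
    simp only [List.filterMap_cons, List.flatMap_cons]
    cases hl : pvLookup md k o with
    | none =>
      simp only [pvCell, hl]
      rw [List.nil_append]; exact ih
    | some r =>
      simp only [pvCell, hl]
      split_ifs with h
      · rw [List.singleton_append]; exact congrArg _ ih
      · rw [List.nil_append]; exact ih

-- ===== VERDICT (by name: the statement is the Claim_ definition above) =====
theorem get_early_termination_sims_spec : Claim_equal_get_early_termination_sims := by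
  intro ks offsets md _ _
  unfold Spec_get_early_termination_sims get_early_termination_sims get_early_termination_sims_alt
  rw [grid_eq]
  simp [pvCollect_eq_flatMap]
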